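-- pv_equiv track=rewrite | github.com/Fillrobs/Fillrobs | vscodetest/src/initialize/create_objects.py | _determine_build_type
-- ===== SOURCE A (Python) =====
-- def _determine_build_type(build_dict):
--     """
--     Based on attributes, determine what type of a build this is supposed to be
--     """
--
--     type_attributes = {
--         "aws": ["ami_id"],
--         "os": ["osi_id"],
--         "vmsphere": ["vmware_template"],
--         "xen": ["xen_template"],
--         "qemu": ["qemu_template"],
--         "razor": ["profile_name"],
--         "slayer": ["slayer_template"],
--         "?": ["guestid"],  # FIXME
--     }
--
--     os_build_type = None
--     for itype, attributes in list(type_attributes.items()):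
--         # Check which attributes for this type are present:
--         present_attributes = [attr for attr in attributes if attr in build_dict]
--         # print "build_dict:", build_dict
--         # print "attributes:", attributes
--         # print "present_attributes for", itype, present_attributes
--         if not present_attributes:
--             continue
--         elif len(present_attributes) == len(attributes):
--             if os_build_type:
--                 raise ValueError(
--                     "Can not determine build type of: %s" % build_dict["name"]
--                 )
--             os_build_type = itype
--         else:
--             raise ValueError("Can not determine build type of: %s" % build_dict["name"])
--
--     if not os_build_type:
--         raise ValueError("Can not determine build type of: %s" % build_dict["name"])
--
--     return os_build_type
-- ===== SOURCE B (Python) =====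
-- def _determine_build_type(build_dict):
--     """
--     Based on attributes, determine what type of a build this is supposed to be
--     """
--     attr_to_type = {
--         "ami_id": "aws",
--         "osi_id": "os",
--         "vmware_template": "vmsphere",
--         "xen_template": "xen",
--         "qemu_template": "qemu",
--         "profile_name": "razor",
--         "slayer_template": "slayer",
--         "guestid": "?",  # FIXME
--     }
--     matches = [attr_to_type[k] for k in build_dict if k in attr_to_type]
--     if len(matches) != 1:
--         raise ValueError("Can not determine build type of: %s" % build_dict["name"])
--     return matches[0]
-- ===== Notes on version B (the rewrite author's own statement) =====
-- stated objective: simpler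
-- what changed: Replaces the loop over the fixed type table with membership tests against the input by a reverse attribute-to-type index and a single scan of the input dict's keys, collecting matches and requiring exactly one.
import Mathlib
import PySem

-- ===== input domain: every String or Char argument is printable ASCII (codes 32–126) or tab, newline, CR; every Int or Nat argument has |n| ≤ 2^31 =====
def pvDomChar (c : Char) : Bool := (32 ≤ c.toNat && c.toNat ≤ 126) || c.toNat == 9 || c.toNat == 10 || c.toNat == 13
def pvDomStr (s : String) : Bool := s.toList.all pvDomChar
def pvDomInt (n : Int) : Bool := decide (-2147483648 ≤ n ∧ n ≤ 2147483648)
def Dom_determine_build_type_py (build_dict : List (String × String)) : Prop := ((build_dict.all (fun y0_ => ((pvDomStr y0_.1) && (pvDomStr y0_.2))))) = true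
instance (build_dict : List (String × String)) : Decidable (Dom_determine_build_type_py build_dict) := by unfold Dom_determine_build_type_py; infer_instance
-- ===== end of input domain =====

-- B replaces A's loop over the fixed type table (membership-testing each attribute in the
-- input) by a reverse attribute→type index and one scan over the input dict's keys (simpler).


-- ===== PORT A =====
-- the fixed type_attributes table, in A's insertion order
def pvTypeAttrs : List (String × List String) :=
  [("aws", ["ami_id"]), ("os", ["osi_id"]), ("vmsphere", ["vmware_template"]),
   ("xen", ["xen_template"]), ("qemu", ["qemu_template"]), ("razor", ["profile_name"]),
   ("slayer", ["slayer_template"]), ("?", ["guestid"])]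

-- A's for-loop over type_attributes.items(); `none` result = one of A's `raise ValueError` paths.
-- `if os_build_type:` is ported as an Option test: every itype in the table is a nonempty
-- (truthy) string, and the initial value is None.
def pvLoopA (ks : List String) : List (String × List String) → Option String → Option String
  | [], acc => acc
  | (itype, attrs) :: rest, acc =>
    let present := attrs.filter (fun a => ks.contains a)   -- [attr for attr in attributes if attr in build_dict]
    if present.isEmpty then pvLoopA ks rest acc
    else if present.length = attrs.length then
      match acc with
      | some _ => none                                     -- raise ValueError
      | none => pvLoopA ks rest (some itype)
    else none                                              -- raise ValueError

def determine_build_type_py (build_dict : List (String × String)) : String :=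
  -- final `if not os_build_type: raise` is the none case; the raise paths lie outside Pre_,
  -- .getD "" only totalises them
  (pvLoopA (build_dict.map Prod.fst) pvTypeAttrs none).getD ""

-- ===== PORT B =====
-- the reverse index attr_to_type
def pvAttrToType : PySem.Dict String String :=
  PySem.Dict.ofList
    [("ami_id", "aws"), ("osi_id", "os"), ("vmware_template", "vmsphere"),
     ("xen_template", "xen"), ("qemu_template", "qemu"), ("profile_name", "razor"),
     ("slayer_template", "slayer"), ("guestid", "?")]

-- [attr_to_type[k] for k in build_dict if k in attr_to_type]; `none` = raise ValueError
def pvAuxB (build_dict : List (String × String)) : Option String :=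
  let ms := (build_dict.map Prod.fst).filterMap (fun k => pvAttrToType.get? k)
  if ms.length ≠ 1 then none else ms.head?

def determine_build_type_py_alt (build_dict : List (String × String)) : String :=
  (pvAuxB build_dict).getD ""

-- ===== PRECONDITION & SPEC =====
def pvAttrNames : List String :=
  ["ami_id", "osi_id", "vmware_template", "xen_template", "qemu_template",
   "profile_name", "slayer_template", "guestid"]

-- Exactly the inputs on which A returns: exactly one key slot of the dict holds one of the
-- eight build-type attributes (zero or several present → A raises ValueError; a duplicated
-- attribute key cannot occur in a real Python dict, so counting occurrences equals counting
-- distinct present attributes there).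
def Pre_determine_build_type_py (build_dict : List (String × String)) : Prop :=
  (build_dict.map Prod.fst).countP (fun k => pvAttrNames.contains k) = 1

instance (build_dict : List (String × String)) : Decidable (Pre_determine_build_type_py build_dict) := by
  unfold Pre_determine_build_type_py; infer_instance

def pvWitness_determine_build_type_py : (List (String × String)) :=
  [("name", "b1"), ("ami_id", "ami-123")]

def Spec_determine_build_type_py (build_dict : List (String × String)) (out : String) : Prop := out = determine_build_type_py_alt build_dict
instance (build_dict : List (String × String)) (out : String) : Decidable (Spec_determine_build_type_py build_dict out) := by unfold Spec_determine_build_type_py; infer_instance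

-- ===== CLAIM (what is proved, stated in full; the proofs are below) =====
def Claim_equal_determine_build_type_py : Prop := ∀ (build_dict : List (String × String)), Dom_determine_build_type_py build_dict → Pre_determine_build_type_py build_dict → Spec_determine_build_type_py build_dict (determine_build_type_py build_dict)

-- ===== LEMMAS AND PROOFS =====

-- the unique present attribute: countP = 1 means the filtered key list is a singleton
theorem pv_filter_singleton (ks : List String)
    (h : ks.countP (fun k => pvAttrNames.contains k) = 1) :
    ∃ a, ks.filter (fun k => pvAttrNames.contains k) = [a] := by
  have hlen : (ks.filter (fun k => pvAttrNames.contains k)).length = 1 := by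
    rw [← List.countP_eq_length_filter]; exact h
  exact List.length_eq_one_iff.mp hlen

theorem pv_mem_iff (ks : List String) (a : String)
    (hf : ks.filter (fun k => pvAttrNames.contains k) = [a])
    (x : String) (hx : pvAttrNames.contains x = true) : (x ∈ ks ↔ x = a) := by
  constructor
  · intro hm
    have hxf : x ∈ ks.filter (fun k => pvAttrNames.contains k) :=
      List.mem_filter.mpr ⟨hm, hx⟩
    rw [hf] at hxf; simpa using hxf
  · intro hxa
    subst hxa
    have : x ∈ ks.filter (fun k => pvAttrNames.contains k) := by rw [hf]; simp
    exact (List.mem_filter.mp this).1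

-- evaluation of A's loop once the unique present attribute is known
theorem pvLoopA_eval (ks : List String) (a : String)
    (hf : ks.filter (fun k => pvAttrNames.contains k) = [a]) :
    pvLoopA ks pvTypeAttrs none = (pvAttrToType.get? a) := by
  have hmem := pv_mem_iff ks a hf
  have ha : a ∈ pvAttrNames := by
    have : a ∈ ks.filter (fun k => pvAttrNames.contains k) := by rw [hf]; simp
    exact List.contains_iff_mem.mp (List.mem_filter.mp this).2
  simp [pvAttrNames] at ha
  rcases ha with rfl | rfl | rfl | rfl | rfl | rfl | rfl | rfl <;>
    simp [pvLoopA, pvTypeAttrs,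
      hmem "ami_id" (by decide), hmem "osi_id" (by decide), hmem "vmware_template" (by decide),
      hmem "xen_template" (by decide), hmem "qemu_template" (by decide),
      hmem "profile_name" (by decide), hmem "slayer_template" (by decide),
      hmem "guestid" (by decide)] <;> decide

-- a lookup in the reverse index succeeds exactly on the attribute keys
theorem pv_isSome_get?_mk (l : List (String × String)) (k : String) :
    ((PySem.Dict.mk l).get? k).isSome = (l.map Prod.fst).contains k := by
  induction l with
  | nil => simp [PySem.Dict.get?]
  | cons p t ih =>
    rw [PySem.Dict.get?_mk_cons]
    by_cases hk : p.1 = k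
    · simp [hk]
    · simp [hk, ih, Ne.symm hk]

theorem pv_isSome_get? (k : String) :
    (pvAttrToType.get? k).isSome = pvAttrNames.contains k := by
  have h : pvAttrToType = PySem.Dict.mk
    [("ami_id", "aws"), ("osi_id", "os"), ("vmware_template", "vmsphere"),
     ("xen_template", "xen"), ("qemu_template", "qemu"), ("profile_name", "razor"),
     ("slayer_template", "slayer"), ("guestid", "?")] := by decide
  rw [h, pv_isSome_get?_mk]
  rfl

-- B's filterMap only keeps the keys whose lookup succeeds, i.e. the attribute keys
theorem pv_filterMap_filter (ks : List String) :
    ks.filterMap (fun k => pvAttrToType.get? k)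
      = (ks.filter (fun k => pvAttrNames.contains k)).filterMap (fun k => pvAttrToType.get? k) := by
  induction ks with
  | nil => rfl
  | cons h t ih =>
    cases hp : pvAttrNames.contains h with
    | true =>
      obtain ⟨v, hv⟩ := Option.isSome_iff_exists.mp ((pv_isSome_get? h).trans hp)
      simp only [List.filterMap_cons, List.filter_cons, hp, if_true, hv, ih]
    | false =>
      have hn : pvAttrToType.get? h = none :=
        Option.not_isSome_iff_eq_none.mp (by rw [pv_isSome_get?, hp]; simp)
      simp only [List.filterMap_cons, List.filter_cons, hp, hn, ih]
      simp

theorem pvAuxB_eval (bd : List (String × String)) (a : String)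
    (hf : (bd.map Prod.fst).filter (fun k => pvAttrNames.contains k) = [a]) :
    pvAuxB bd = pvAttrToType.get? a := by
  have ha : pvAttrNames.contains a = true := by
    have : a ∈ (bd.map Prod.fst).filter (fun k => pvAttrNames.contains k) := by rw [hf]; simp
    exact (List.mem_filter.mp this).2
  obtain ⟨v, hv⟩ := Option.isSome_iff_exists.mp ((pv_isSome_get? a).trans ha)
  unfold pvAuxB
  rw [pv_filterMap_filter, hf]
  simp [hv]

-- ===== VERDICT (by name: the statement is the Claim_ definition above) =====
theorem determine_build_type_py_spec : Claim_equal_determine_build_type_py := by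
  intro bd _ hpre
  unfold Spec_determine_build_type_py determine_build_type_py determine_build_type_py_alt
  obtain ⟨a, hf⟩ := pv_filter_singleton (bd.map Prod.fst) hpre
  rw [pvLoopA_eval (bd.map Prod.fst) a hf, pvAuxB_eval bd a hf]
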